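-- pv_equiv track=rewrite | github.com/neuroinformatics-unit/derotation | examples/read_suite2p_output.py | find_zero_chunks
-- ===== SOURCE A (Python) =====
-- def find_zero_chunks(arr):
--     zero_chunks = []
--     start = None
--
--     for i in range(len(arr)):
--         if arr[i] == 0 and start is None:
--             start = i
--         elif arr[i] != 0 and start is not None:
--             zero_chunks.append((start, i - 1))
--             start = None
--
--     # Check if the array ends with a chunk of zeros
--     if start is not None:
--         zero_chunks.append((start, len(arr) - 1))
--
--     return zero_chunks
-- ===== SOURCE B (Python) =====
-- def find_zero_chunks(arr):
--     zeros = [i for i, v in enumerate(arr) if v == 0]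
--     runs = []
--     for z in reversed(zeros):
--         if runs and z == runs[0][0] - 1:
--             runs[0] = (z, runs[0][1])
--         else:
--             runs.insert(0, (z, z))
--     return runs
-- ===== Notes on version B (the rewrite author's own statement) =====
-- stated objective: idiomatic
-- what changed: Replaces the start/None sentinel state machine over all indices by first collecting the zero positions with a comprehension and then merging consecutive positions into (start,end) runs, built back-to-front.
import Mathlib
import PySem

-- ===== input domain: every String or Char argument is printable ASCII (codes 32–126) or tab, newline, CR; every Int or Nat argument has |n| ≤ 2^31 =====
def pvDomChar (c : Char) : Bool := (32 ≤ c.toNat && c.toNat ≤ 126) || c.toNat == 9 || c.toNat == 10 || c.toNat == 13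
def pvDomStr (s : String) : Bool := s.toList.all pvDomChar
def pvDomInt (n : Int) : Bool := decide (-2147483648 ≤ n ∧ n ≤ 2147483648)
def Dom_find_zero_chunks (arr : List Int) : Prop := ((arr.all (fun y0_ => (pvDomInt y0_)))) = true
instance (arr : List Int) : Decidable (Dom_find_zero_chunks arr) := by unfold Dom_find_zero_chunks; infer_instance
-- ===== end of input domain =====

-- B replaces A's start/None sentinel state machine by collecting the zero positions
-- and merging consecutive positions into runs, built back-to-front (objective: idiomatic).

-- ===== PORT A =====
-- loop body of A: state = (zero_chunks, start)
def stepA (s : List (Int × Int) × Option Int) (iv : Int × Int) : List (Int × Int) × Option Int :=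
  match s.2 with
  | none => if iv.2 = 0 then (s.1, some iv.1) else s
  | some st => if iv.2 ≠ 0 then (s.1 ++ [(st, iv.1 - 1)], none) else s

def find_zero_chunks (arr : List Int) : List (Int × Int) :=
  let st := (PySem.List.enumerate arr).foldl stepA ([], none)
  match st.2 with
  | some s => st.1 ++ [(s, (arr.length : Int) - 1)]
  | none => st.1

-- ===== PORT B =====
-- loop body of B: prepend (z,z) or extend the front run (iteration over reversed zeros)
def stepB (z : Int) (runs : List (Int × Int)) : List (Int × Int) :=
  match runs with
  | (a, b) :: rest => if z = a - 1 then (z, b) :: rest else (z, z) :: (a, b) :: rest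
  | [] => [(z, z)]

def find_zero_chunks_alt (arr : List Int) : List (Int × Int) :=
  let zeros := ((PySem.List.enumerate arr).filter (fun p => p.2 == 0)).map (·.1)
  zeros.foldr stepB []

-- ===== PRECONDITION & SPEC =====
def Spec_find_zero_chunks (arr : List Int) (out : List (Int × Int)) : Prop := out = find_zero_chunks_alt arr
instance (arr : List Int) (out : List (Int × Int)) : Decidable (Spec_find_zero_chunks arr out) := by unfold Spec_find_zero_chunks; infer_instance

-- ===== CLAIM (what is proved, stated in full; the proofs are below) =====
def Claim_equal_find_zero_chunks : Prop := ∀ (arr : List Int), Dom_find_zero_chunks arr → Spec_find_zero_chunks arr (find_zero_chunks arr)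

-- ===== LEMMAS AND PROOFS =====

-- zero positions of l, indexed from i
def Zs (i : Int) (l : List Int) : List Int :=
  ((PySem.List.enumerate l i).filter (fun p => p.2 == 0)).map (·.1)

-- B's run builder
def Rs (zs : List Int) : List (Int × Int) := zs.foldr stepB []

def finalize (p : List (Int × Int) × Option Int) (n : Int) : List (Int × Int) :=
  match p.2 with
  | some s => p.1 ++ [(s, n - 1)]
  | none => p.1

-- A's loop over the suffix l starting at index i, with empty accumulated chunks
def GA (l : List Int) (i : Int) (st : Option Int) : List (Int × Int) :=
  finalize ((PySem.List.enumerate l i).foldl stepA ([], st)) (i + l.length)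

-- how an open run started at s interacts with the runs of the remaining zeros, cut at i
def mrg (s i : Int) : List (Int × Int) → List (Int × Int)
  | (a, b) :: r => if a = i then (s, b) :: r else (s, i - 1) :: (a, b) :: r
  | [] => [(s, i - 1)]

lemma Zs_nil (i : Int) : Zs i [] = [] := by simp [Zs, PySem.List.enumerate]

lemma Zs_cons (i : Int) (v : Int) (l : List Int) :
    Zs i (v :: l) = if v = 0 then i :: Zs (i + 1) l else Zs (i + 1) l := by
  by_cases h : v = 0 <;> simp [Zs, PySem.List.enumerate_cons, h]

lemma Zs_ge (l : List Int) : ∀ (i z : Int), z ∈ Zs i l → i ≤ z := by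
  induction l with
  | nil => intro i z hz; simp [Zs_nil] at hz
  | cons v rest ih =>
    intro i z hz
    rw [Zs_cons] at hz
    by_cases h : v = 0
    · simp [h] at hz
      rcases hz with h1 | h2
      · omega
      · have := ih (i + 1) z h2; omega
    · simp [h] at hz
      have := ih (i + 1) z hz; omega

lemma Rs_head (i : Int) (l : List Int) (a b : Int) (r : List (Int × Int))
    (h : Rs (Zs i l) = (a, b) :: r) : i ≤ a := by
  cases hz : Zs i l with
  | nil => rw [hz] at h; simp [Rs] at h
  | cons z zs =>
    have hzmem : z ∈ Zs i l := by rw [hz]; exact List.mem_cons_self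
    have hiz : i ≤ z := Zs_ge l i z hzmem
    rw [hz] at h
    have : a = z := by
      simp only [Rs, List.foldr_cons] at h
      cases hr : (zs.foldr stepB []) with
      | nil => rw [hr] at h; simp [stepB] at h; omega
      | cons p r' =>
        rw [hr] at h
        rcases p with ⟨a', b'⟩
        simp only [stepB] at h
        split at h <;> simp at h <;> omega
    omega

lemma stepA_shift (l : List (Int × Int)) :
    ∀ (acc c : List (Int × Int)) (st : Option Int),
      l.foldl stepA (acc ++ c, st) =
        (acc ++ (l.foldl stepA (c, st)).1, (l.foldl stepA (c, st)).2) := by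
  induction l with
  | nil => intro acc c st; simp
  | cons x rest ih =>
    intro acc c st
    have hx : stepA (acc ++ c, st) x = (acc ++ (stepA (c, st) x).1, (stepA (c, st) x).2) := by
      rcases st with _ | s <;> simp only [stepA] <;> split <;> simp
    simp only [List.foldl_cons, hx]
    rcases hs : stepA (c, st) x with ⟨c', st'⟩
    exact ih acc c' st'

lemma stepA_shift' (l : List (Int × Int)) (acc : List (Int × Int)) (st : Option Int) :
    l.foldl stepA (acc, st) =
      (acc ++ (l.foldl stepA ([], st)).1, (l.foldl stepA ([], st)).2) := by
  have h := stepA_shift l acc [] st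
  simpa using h

lemma finalize_shift (acc : List (Int × Int)) (p : List (Int × Int) × Option Int) (n : Int) :
    finalize (acc ++ p.1, p.2) n = acc ++ finalize p n := by
  rcases p with ⟨c, _ | s⟩ <;> simp [finalize]

lemma GA_char (l : List Int) : ∀ (i : Int),
    GA l i none = Rs (Zs i l) ∧ ∀ s, GA l i (some s) = mrg s i (Rs (Zs i l)) := by
  induction l with
  | nil =>
    intro i
    constructor
    · simp [GA, PySem.List.enumerate, finalize, Rs, Zs_nil]
    · intro s; simp [GA, PySem.List.enumerate, finalize, Rs, Zs_nil, mrg]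
  | cons v rest ih =>
    intro i
    have hn : i + ((v :: rest).length : Int) = (i + 1) + (rest.length : Int) := by
      simp [List.length_cons]; ring
    have hGnone : ∀ st', GA (v :: rest) i st' =
        finalize ((PySem.List.enumerate rest (i + 1)).foldl stepA (stepA ([], st') (i, v)))
          ((i + 1) + rest.length) := by
      intro st'
      simp only [GA, PySem.List.enumerate_cons, List.foldl_cons, hn]
    constructor
    · -- start = none
      rw [hGnone]
      by_cases hv : v = 0
      · have h1 : stepA ([], none) (i, v) = ([], some i) := by simp [stepA, hv]
        rw [h1]
        have := (ih (i + 1)).2 i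
        simp only [GA] at this
        rw [this, Zs_cons, if_pos hv]
        -- mrg i (i+1) (Rs zs) = stepB i (Rs zs) = Rs (i :: zs)
        cases hr : Rs (Zs (i + 1) rest) with
        | nil =>
          simp only [Rs, List.foldr_cons] at hr ⊢
          rw [hr]; simp [mrg, stepB]
        | cons p r =>
          rcases p with ⟨a, b⟩
          have hRs : Rs (i :: Zs (i + 1) rest) = stepB i ((a, b) :: r) := by
            simp [Rs, List.foldr_cons] at hr ⊢; rw [hr]
          rw [hRs]
          by_cases ha : a = i + 1
          · simp [mrg, stepB, ha]
          · have : ¬ (i = a - 1) := by omega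
            simp [mrg, stepB, ha, this]
      · have h1 : stepA ([], none) (i, v) = ([], none) := by simp [stepA, hv]
        rw [h1]
        have := (ih (i + 1)).1
        simp only [GA] at this
        rw [this, Zs_cons, if_neg hv]
    · -- start = some s
      intro s
      rw [hGnone]
      by_cases hv : v = 0
      · have h1 : stepA ([], some s) (i, v) = ([], some s) := by simp [stepA, hv]
        rw [h1]
        have := (ih (i + 1)).2 s
        simp only [GA] at this
        rw [this, Zs_cons, if_pos hv]
        -- mrg s (i+1) (Rs zs) = mrg s i (Rs (i :: zs))
        have hRs : Rs (i :: Zs (i + 1) rest) = stepB i (Rs (Zs (i + 1) rest)) := by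
          simp [Rs, List.foldr_cons]
        rw [hRs]
        cases hr : Rs (Zs (i + 1) rest) with
        | nil => simp [mrg, stepB]
        | cons p r =>
          rcases p with ⟨a, b⟩
          have hia : i + 1 ≤ a := Rs_head (i + 1) rest a b r hr
          by_cases ha : a = i + 1
          · subst ha
            norm_num [mrg, stepB]
          · have h2 : ¬ ((i : Int) = a - 1) := by omega
            simp [mrg, stepB, ha, h2]
      · have h1 : stepA ([], some s) (i, v) = ([(s, i - 1)], none) := by simp [stepA, hv]
        rw [h1]
        rw [stepA_shift' (PySem.List.enumerate rest (i + 1)) [(s, i - 1)] none]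
        rw [finalize_shift [(s, i - 1)]
          ((PySem.List.enumerate rest (i + 1)).foldl stepA ([], none)) ((i + 1) + rest.length)]
        have := (ih (i + 1)).1
        simp only [GA] at this
        rw [this, Zs_cons, if_neg hv]
        cases hr : Rs (Zs (i + 1) rest) with
        | nil => simp [mrg]
        | cons p r =>
          rcases p with ⟨a, b⟩
          have hia : i + 1 ≤ a := Rs_head (i + 1) rest a b r hr
          have ha : ¬ (a = i) := by omega
          simp [mrg, ha]

-- ===== VERDICT (by name: the statement is the Claim_ definition above) =====
theorem find_zero_chunks_spec : Claim_equal_find_zero_chunks := by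
  intro arr _
  show find_zero_chunks arr = find_zero_chunks_alt arr
  have h := (GA_char arr 0).1
  have hA : find_zero_chunks arr = GA arr 0 none := by
    simp [find_zero_chunks, GA, finalize]
  have hB : find_zero_chunks_alt arr = Rs (Zs 0 arr) := by
    simp [find_zero_chunks_alt, Rs, Zs]
  rw [hA, hB, h]
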